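-- pv_equiv track=rewrite | github.com/john1973purdue/ppnd | SpanPPND_nocomments.py | move_accent
-- ===== SOURCE A (Python) =====
-- vowels = ["a","e","i","o","u","A","E","I","O","U"]
--
-- def move_accent(word):
--
--     accentlist = []
--     stressoutput = []
--
--     for i, c in enumerate(list(word)):
--         if c in vowels:
--             stressoutput.append(c.lower())
--         else:
--             stressoutput.append(c)
--     wordtemp = "".join(stressoutput)
--
--     for i, c in enumerate(list(wordtemp)):
--         if c in vowels:
--             accentlist.append(wordtemp[:i]+c.upper()+wordtemp[i+1:])
--
--     return accentlist
-- ===== SOURCE B (Python) =====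
-- def move_accent(word):
--     # Single back-to-front pass: maintain the normalized suffix and its variants;
--     # each step prepends one character to every variant and possibly adds the
--     # variant with this vowel uppercased.
--     vowels = "aeiouAEIOU"
--     norm = ""       # vowel-lowercased form of the suffix processed so far
--     variants = []   # variants of that suffix, in left-to-right vowel order
--     for c in reversed(word):
--         low = c.lower() if c in vowels else c
--         variants = ([c.upper() + norm] if c in vowels else []) + [low + v for v in variants]
--         norm = low + norm
--     return variants
-- ===== Notes on version B (the rewrite author's own statement) =====
-- stated objective: alternative
-- what changed: Replaces A's two staged passes (first build the fully vowel-lowercased string wordtemp, then for each vowel index concatenate wordtemp[:i]+upper+wordtemp[i+1:]) with a single back-to-front pass that never materializes the normalized word up front: it folds over the reversed word keeping (normalized suffix, variants of that suffix), prepending each character to all existing variants and inserting the uppercased-vowel variant as it goes; no indices and no slicing.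
import Mathlib
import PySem

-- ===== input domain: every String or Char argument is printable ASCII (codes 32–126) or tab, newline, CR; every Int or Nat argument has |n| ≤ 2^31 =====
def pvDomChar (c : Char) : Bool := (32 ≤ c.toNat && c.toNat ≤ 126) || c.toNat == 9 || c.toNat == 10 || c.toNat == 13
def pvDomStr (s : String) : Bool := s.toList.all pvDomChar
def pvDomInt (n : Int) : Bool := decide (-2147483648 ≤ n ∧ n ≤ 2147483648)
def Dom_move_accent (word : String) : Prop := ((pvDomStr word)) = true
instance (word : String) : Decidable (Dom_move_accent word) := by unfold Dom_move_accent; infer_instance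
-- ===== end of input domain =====

-- B replaces A's two staged passes (lowercase all vowels, then slice-rebuild one variant
-- per vowel index) by one back-to-front fold keeping (normalized suffix, its variants);
-- objective: alternative (same cost, no indices/slices/intermediate normalized word).

-- ===== PORT A =====
def pvVowelsA : List Char := ['a','e','i','o','u','A','E','I','O','U']

-- Char.toLower / Char.toUpper are exact for Python's 1-char str.lower()/upper() on ASCII (Dom)
def move_accent (word : String) : List String :=
  let stressoutput : List Char :=
    word.toList.foldl (fun acc c => if c ∈ pvVowelsA then acc ++ [c.toLower] else acc ++ [c]) []
  let wordtemp : List Char := stressoutput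
  let accentlist : List String :=
    (PySem.List.enumerate wordtemp).foldl (fun acc ic =>
      if ic.2 ∈ pvVowelsA then
        acc ++ [String.ofList (PySem.List.slice wordtemp none (some ic.1) ++ [ic.2.toUpper]
                 ++ PySem.List.slice wordtemp (some (ic.1 + 1)) none)]
      else acc) []
  accentlist

-- ===== PORT B =====
def pvVowelsB : List Char := "aeiouAEIOU".toList   -- 'c in vowels' for a 1-char c is char membership

-- Python strings are modeled as char lists (exact on the ASCII domain); 'for c in reversed(word)'
-- with the running state (norm, variants) is the foldr over word's characters.
def move_accent_alt (word : String) : List String :=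
  let step : Char → List Char × List (List Char) → List Char × List (List Char) :=
    fun c st =>
      let low := if c ∈ pvVowelsB then c.toLower else c
      ((low :: st.1),
       (if c ∈ pvVowelsB then [c.toUpper :: st.1] else []) ++ st.2.map (low :: ·))
  ((word.toList.foldr step ([], [])).2).map String.ofList

-- ===== PRECONDITION & SPEC =====
def Spec_move_accent (word : String) (out : List String) : Prop := out = move_accent_alt word
instance (word : String) (out : List String) : Decidable (Spec_move_accent word out) := by unfold Spec_move_accent; infer_instance

-- ===== CLAIM (what is proved, stated in full; the proofs are below) =====
def Claim_equal_move_accent : Prop := ∀ (word : String), Dom_move_accent word → Spec_move_accent word (move_accent word)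

-- ===== LEMMAS AND PROOFS =====

-- A's normalization of one character
def pvF (c : Char) : Char := if c ∈ pvVowelsA then c.toLower else c

-- common recursive characterization: variants of a char list, as char lists
def pvS : List Char → List (List Char)
  | [] => []
  | c :: rest =>
      (if c ∈ pvVowelsA then [c.toUpper :: rest.map pvF] else []) ++ (pvS rest).map (pvF c :: ·)

theorem pvVowelsB_eq : pvVowelsB = pvVowelsA := by decide

theorem pvF_mem_iff (c : Char) : pvF c ∈ pvVowelsA ↔ c ∈ pvVowelsA := by
  by_cases h : c ∈ pvVowelsA
  · simp only [pvF, if_pos h]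
    exact ⟨fun _ => h, fun _ => by fin_cases h <;> decide⟩
  · simp [pvF, h]

theorem pvF_toUpper (c : Char) (h : c ∈ pvVowelsA) : (pvF c).toUpper = c.toUpper := by
  fin_cases h <;> decide

-- generic loop shape for A's second loop
theorem pv_foldl_filtermap {α β : Type} (p : α → Prop) [DecidablePred p] (g : α → β)
    (l : List α) (acc : List β) :
    l.foldl (fun a x => if p x then a ++ [g x] else a) acc
      = acc ++ (l.filter (fun x => decide (p x))).map g := by
  induction l generalizing acc with
  | nil => simp
  | cons x xs ih =>
    by_cases h : p x <;> simp [List.foldl, h, ih, List.append_assoc]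

theorem pv_enumerate_shift (l : List Char) (s : Int) :
    PySem.List.enumerate l (s + 1) = (PySem.List.enumerate l s).map (fun p => (p.1 + 1, p.2)) := by
  induction l generalizing s with
  | nil => simp [PySem.List.enumerate_nil]
  | cons x xs ih => simp [PySem.List.enumerate_cons, ih]

-- A's per-vowel slice expression is a List.set of the normalized word
theorem pv_slice_set (chars : List Char) (k : Nat) (hk : k < chars.length)
    (hv : chars[k] ∈ pvVowelsA) :
    PySem.List.slice (chars.map pvF) none (some (k : Int)) ++ [(chars[k]).toUpper]
      ++ PySem.List.slice (chars.map pvF) (some ((k : Int) + 1)) none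
      = (chars.map pvF).set k ((chars[k]).toUpper) := by
  rw [PySem.List.slice_to_natCast,
      show ((k : Nat) : Int) + 1 = (((k+1) : Nat) : Int) by push_cast; omega,
      PySem.List.slice_from_natCast]
  rw [List.set_eq_take_append_cons_drop, if_pos (by simpa using hk)]
  simp

-- the set-form of A's output equals pvS
theorem pv_setform_eq_pvS (chars : List Char) :
    ((PySem.List.enumerate chars 0).filter (fun ic => decide (ic.2 ∈ pvVowelsA))).map
        (fun ic => (chars.map pvF).set ic.1.toNat (ic.2.toUpper))
      = pvS chars := by
  induction chars with
  | nil => simp [PySem.List.enumerate_nil, pvS]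
  | cons c rest ih =>
    rw [PySem.List.enumerate_cons, show (0 : Int) + 1 = 0 + 1 by ring, pv_enumerate_shift]
    rw [List.filter_cons, List.filter_map]
    have htail :
        List.map (fun ic : Int × Char => (pvF c :: rest.map pvF).set ic.1.toNat (ic.2.toUpper))
          (List.map (fun p : Int × Char => (p.1 + 1, p.2))
            ((PySem.List.enumerate rest 0).filter
              ((fun ic : Int × Char => decide (ic.2 ∈ pvVowelsA)) ∘ fun p => (p.1 + 1, p.2))))
          = (pvS rest).map (pvF c :: ·) := by
      rw [List.map_map]
      have hfil : ((PySem.List.enumerate rest 0).filter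
            ((fun ic : Int × Char => decide (ic.2 ∈ pvVowelsA)) ∘ fun p => (p.1 + 1, p.2)))
          = (PySem.List.enumerate rest 0).filter (fun ic => decide (ic.2 ∈ pvVowelsA)) := by
        apply List.filter_congr; intro p _; simp [Function.comp]
      rw [hfil, ← ih, List.map_map]
      apply List.map_congr_left
      intro p hp
      rcases (PySem.List.mem_enumerate_iff _ _ _).mp (List.mem_filter.mp hp).1 with ⟨k, hk, hpk⟩
      subst hpk
      have h1 : ((0 : Int) + (k : Int) + 1).toNat = k + 1 := by omega
      have h2 : ((0 : Int) + (k : Int)).toNat = k := by omega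
      simp [Function.comp, h1, h2, List.map_cons]
    by_cases h : c ∈ pvVowelsA
    · simp only [h, decide_true, if_true, List.map_cons, pvS]
      rw [htail]
      simp
    · simp only [h, decide_false, Bool.false_eq_true, if_false, List.map_cons, pvS]
      rw [htail]
      simp [h]

-- A equals pvS (as strings)
theorem pv_A_eq (word : String) :
    move_accent word = (pvS word.toList).map String.ofList := by
  unfold move_accent
  simp only []
  set chars := word.toList with hchars
  have h1 : chars.foldl (fun acc c => if c ∈ pvVowelsA then acc ++ [c.toLower] else acc ++ [c]) []
      = chars.map pvF := by
    have : ∀ (l : List Char) (acc : List Char),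
        l.foldl (fun acc c => if c ∈ pvVowelsA then acc ++ [c.toLower] else acc ++ [c]) acc
          = acc ++ l.map pvF := by
      intro l
      induction l with
      | nil => simp
      | cons x xs ih =>
        intro acc
        by_cases h : x ∈ pvVowelsA <;> simp [List.foldl, h, ih, pvF, List.append_assoc]
    simpa using this chars []
  rw [h1]
  rw [pv_foldl_filtermap (fun ic : Int × Char => ic.2 ∈ pvVowelsA)
        (fun ic => String.ofList (PySem.List.slice (chars.map pvF) none (some ic.1) ++ [ic.2.toUpper]
                 ++ PySem.List.slice (chars.map pvF) (some (ic.1 + 1)) none)) _ []]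
  have henum0 : ∀ (l : List Char) (s : Int), PySem.List.enumerate (l.map pvF) s
      = (PySem.List.enumerate l s).map (fun p => (p.1, pvF p.2)) := by
    intro l
    induction l with
    | nil => intro s; simp [PySem.List.enumerate_nil]
    | cons y ys ihy => intro s; simp [PySem.List.enumerate_cons, ihy]
  have henum := henum0 chars 0
  rw [henum, List.filter_map, List.map_map]
  have hfil : ((PySem.List.enumerate chars 0).filter
        ((fun ic : Int × Char => decide (ic.2 ∈ pvVowelsA)) ∘ fun p => (p.1, pvF p.2)))
      = (PySem.List.enumerate chars 0).filter (fun ic => decide (ic.2 ∈ pvVowelsA)) := by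
    apply List.filter_congr; intro p _; simp [Function.comp, pvF_mem_iff]
  rw [hfil, ← pv_setform_eq_pvS chars, List.map_map]
  apply List.map_congr_left
  intro ic hmem
  have hmem' := List.mem_filter.mp hmem
  have hv : ic.2 ∈ pvVowelsA := by simpa using hmem'.2
  rcases (PySem.List.mem_enumerate_iff _ _ _).mp hmem'.1 with ⟨k, hk, hic⟩
  subst hic
  simp only [Function.comp, zero_add]
  rw [pvF_toUpper _ (by simpa using hv), pv_slice_set chars k hk (by simpa using hv)]
  rw [Int.toNat_natCast]

-- B's fold computes (normalized list, pvS)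
theorem pv_B_fold (l : List Char) :
    l.foldr (fun c st =>
        ((if c ∈ pvVowelsB then c.toLower else c) :: st.1,
         (if c ∈ pvVowelsB then [c.toUpper :: st.1] else [])
           ++ st.2.map ((if c ∈ pvVowelsB then c.toLower else c) :: ·)))
        (([] : List Char), ([] : List (List Char)))
      = (l.map pvF, pvS l) := by
  induction l with
  | nil => simp [pvS]
  | cons c rest ih =>
    simp only [List.foldr_cons, ih, pvS, List.map_cons]
    rw [pvVowelsB_eq]
    by_cases h : c ∈ pvVowelsA <;> simp [h, pvF]

-- ===== VERDICT (by name: the statement is the Claim_ definition above) =====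
theorem move_accent_spec : Claim_equal_move_accent := by
  intro word _
  unfold Spec_move_accent move_accent_alt
  simp only []
  rw [pv_B_fold word.toList, pv_A_eq word]
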